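-- pv_equiv track=rewrite | github.com/OnYyon/EGE | task15/types/task7.py | check
-- ===== SOURCE A (Python) =====
-- def check(a):
--     for x in range(1000):
--         for y in range(1000):
--             f1 = x * y > a
--             f2 = x > y
--             f3 = x < 8
--             f = f1 and f2 and f3
--             if f != 0:
--                 return False
--     return True
-- ===== SOURCE B (Python) =====
-- def check(a):
--     # A searches x,y < 1000 for a counterexample with x*y > a, x > y, x < 8.
--     # Any such pair has 0 <= y < x <= 7, so the largest reachable product is
--     # 7*6 = 42: a counterexample exists exactly when a < 42.
--     return a >= 42
-- ===== Notes on version B (the rewrite author's own statement) =====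
-- stated objective: faster
-- what changed: Replaced the fixed 1000x1000 counterexample search by the closed form a >= 42 (the maximum product x*y with 0 <= y < x <= 7 is 42).
import Mathlib
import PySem

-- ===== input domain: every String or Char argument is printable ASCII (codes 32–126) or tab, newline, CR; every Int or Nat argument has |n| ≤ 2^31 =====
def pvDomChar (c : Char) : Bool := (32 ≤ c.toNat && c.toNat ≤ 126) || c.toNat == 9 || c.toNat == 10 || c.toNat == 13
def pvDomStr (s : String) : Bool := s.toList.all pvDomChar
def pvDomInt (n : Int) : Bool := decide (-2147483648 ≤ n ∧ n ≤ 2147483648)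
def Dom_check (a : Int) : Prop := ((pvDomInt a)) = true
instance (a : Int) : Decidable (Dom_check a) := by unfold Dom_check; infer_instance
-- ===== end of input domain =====

-- ===== PORT A =====
-- Faithful port of A: nested for-loops over range(1000) with early `return False`
-- ported as nested `List.any`; returns True iff no counterexample is found.
def check (a : Int) : Bool :=
  !((PySem.List.pyRange 0 1000 1).any (fun x =>
      (PySem.List.pyRange 0 1000 1).any (fun y =>
        decide (x * y > a) && decide (x > y) && decide (x < 8))))

-- ===== PORT B =====
-- B: closed form; a counterexample exists exactly when a < 42.
def check_alt (a : Int) : Bool := decide (a ≥ 42)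

-- ===== PRECONDITION & SPEC =====
def Spec_check (a : Int) (out : Bool) : Prop := out = check_alt a
instance (a : Int) (out : Bool) : Decidable (Spec_check a out) := by unfold Spec_check; infer_instance

-- ===== CLAIM (what is proved, stated in full; the proofs are below) =====
def Claim_equal_check : Prop := ∀ (a : Int), Dom_check a → Spec_check a (check a)

-- ===== LEMMAS AND PROOFS =====

-- ===== VERDICT (by name: the statement is the Claim_ definition above) =====
theorem check_spec : Claim_equal_check := by
  intro a _
  unfold Spec_check check check_alt
  by_cases h : a < 42
  · have hx : (PySem.List.pyRange 0 1000 1).any (fun x =>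
        (PySem.List.pyRange 0 1000 1).any (fun y =>
          decide (x * y > a) && decide (x > y) && decide (x < 8))) = true := by
      rw [List.any_eq_true]
      refine ⟨7, ?_, ?_⟩
      · rw [PySem.List.mem_pyRange_one]; omega
      · rw [List.any_eq_true]
        refine ⟨6, ?_, ?_⟩
        · rw [PySem.List.mem_pyRange_one]; omega
        · simp; omega
    simp [hx]; omega
  · have hx : (PySem.List.pyRange 0 1000 1).any (fun x =>
        (PySem.List.pyRange 0 1000 1).any (fun y =>
          decide (x * y > a) && decide (x > y) && decide (x < 8))) = false := by
      rw [List.any_eq_false]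
      intro x hxm
      rw [PySem.List.mem_pyRange_one] at hxm
      intro hc
      rw [List.any_eq_true] at hc
      obtain ⟨y, hym, hy⟩ := hc
      rw [PySem.List.mem_pyRange_one] at hym
      simp only [Bool.and_eq_true, decide_eq_true_eq] at hy
      obtain ⟨⟨h1, h2⟩, h3⟩ := hy
      -- 0 ≤ y < x ≤ 7 so x*y ≤ 42 ≤ a, contradicting x*y > a
      have hy6 : y ≤ 6 := by omega
      have : x * y ≤ 42 := by nlinarith
      omega
    simp [hx]; omega
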